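-- pv_equiv track=rewrite | github.com/Disconnected-7052/WeeWee | Bebas.py | cari_semua_siklus
-- ===== SOURCE A (Python) =====
-- def cari_semua_siklus(graf, awal, jalur=[]):
--     jalur = jalur + [awal]
--     if len(jalur) > 1 and jalur[0] == jalur[-1]:
--         return [jalur]
--     if awal not in graf:
--         return []
--     semua_siklus = []
--     for node in graf[awal]:
--         if node not in jalur or (node == jalur[0] and len(jalur) > 2):
--             siklus_baru = cari_semua_siklus(graf, node, jalur)
--             for s in siklus_baru:
--                 semua_siklus.append(s)
--     return semua_siklus
-- ===== SOURCE B (Python) =====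
-- def cari_semua_siklus(graf, awal, jalur=[]):
--     hasil = []
--     tumpukan = [jalur + [awal]]
--     while tumpukan:
--         path = tumpukan.pop()
--         if len(path) > 1 and path[0] == path[-1]:
--             hasil.append(path)
--             continue
--         if path[-1] not in graf:
--             continue
--         for node in reversed(graf[path[-1]]):
--             if node not in path or (node == path[0] and len(path) > 2):
--                 tumpukan.append(path + [node])
--     return hasil
-- ===== Notes on version B (the rewrite author's own statement) =====
-- stated objective: alternative
-- what changed: Replaces A's recursive DFS (recursion + nested result-append loop) by an iterative DFS with an explicit stack of paths, pushing successors in reverse so A's pre-order output sequence is preserved exactly.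
import Mathlib
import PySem

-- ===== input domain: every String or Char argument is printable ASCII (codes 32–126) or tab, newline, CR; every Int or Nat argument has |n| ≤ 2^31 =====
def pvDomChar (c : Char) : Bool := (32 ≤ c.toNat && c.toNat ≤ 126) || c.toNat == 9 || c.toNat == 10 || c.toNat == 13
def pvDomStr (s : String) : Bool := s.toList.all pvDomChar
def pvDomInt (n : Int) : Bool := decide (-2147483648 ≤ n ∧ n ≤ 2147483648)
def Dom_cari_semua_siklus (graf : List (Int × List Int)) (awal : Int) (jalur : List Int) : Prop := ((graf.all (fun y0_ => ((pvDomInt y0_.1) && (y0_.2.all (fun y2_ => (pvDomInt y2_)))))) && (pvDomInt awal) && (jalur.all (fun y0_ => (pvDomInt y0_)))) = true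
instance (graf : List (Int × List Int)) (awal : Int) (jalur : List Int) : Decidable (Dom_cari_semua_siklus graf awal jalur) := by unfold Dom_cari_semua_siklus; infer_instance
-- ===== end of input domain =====

-- B replaces A's recursion by an iterative DFS over an explicit stack (same pre-order output);
-- objective: alternative decomposition, no speed claim.

-- Shared transliterations of the two Python conditions (both sources contain the identical
-- expressions `len(p) > 1 and p[0] == p[-1]` and `node not in p or (node == p[0] and len(p) > 2)`).
def pvClosing (j : List Int) : Bool :=
  decide (1 < j.length) && (PySem.List.pyGet? j 0 == PySem.List.pyGet? j (-1))

def pvGuard (j : List Int) (node : Int) : Bool :=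
  !j.contains node || (PySem.List.pyGet? j 0 == some node && decide (2 < j.length))

-- ===== PORT A =====
-- Fuel is a pure totality guard: the chosen fuel (sum of adjacency lengths + 2) exceeds the
-- recursion depth A can reach, since every non-closing extension adds a node not yet on the path.
def cariF : Nat → List (Int × List Int) → Int → List Int → List (List Int)
  | 0, _, _, _ => []
  | fuel+1, graf, awal, jalur =>
    let j := jalur ++ [awal]
    if pvClosing j then [j]
    else
      match (PySem.Dict.mk graf).get? awal with
      | none => []
      | some ns =>
          ns.foldl (fun acc node =>
            if pvGuard j node then acc ++ cariF fuel graf node j else acc) []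

def cari_semua_siklus (graf : List (Int × List Int)) (awal : Int) (jalur : List Int) : List (List Int) :=
  cariF ((graf.map fun p => p.2.length).sum + 2) graf awal jalur

-- ===== PORT B =====
-- Iterative DFS: the stack holds whole paths (head of the list = top of the Python stack; each
-- entry also carries a fuel counter, a pure totality guard never exhausted at the chosen fuel).
def pvDeg (graf : List (Int × List Int)) : Nat :=
  (graf.map fun p => p.2.length).foldr max 0

lemma pvDeg_of_get? (graf : List (Int × List Int)) (k : Int) (ns : List Int)
    (h : (PySem.Dict.mk graf).get? k = some ns) : ns.length ≤ pvDeg graf := by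
  induction graf with
  | nil => simp [PySem.Dict.get?] at h
  | cons p rest ih =>
      rw [PySem.Dict.get?_mk_cons] at h
      by_cases hk : p.1 == k
      · simp [hk] at h; subst h; simp [pvDeg]
      · simp [hk] at h
        have := ih h
        simp only [pvDeg, List.map_cons, List.foldr_cons] at *
        omega

lemma pvPush_eq (ns : List Int) (path : List Int) (f' : Nat) (rest : List (Nat × List Int)) :
    ns.reverse.foldl (fun st node => if pvGuard path node then (f', path ++ [node]) :: st else st) rest
      = (ns.filter (pvGuard path)).map (fun node => (f', path ++ [node])) ++ rest := by
  rw [List.foldl_reverse]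
  induction ns with
  | nil => simp
  | cons n ns ih =>
      by_cases h : pvGuard path n <;> simp [h, ih]

def runB (graf : List (Int × List Int)) : List (Nat × List Int) → List (List Int) → List (List Int)
  | [], hasil => hasil
  | (f, path) :: rest, hasil =>
    if pvClosing path then runB graf rest (hasil ++ [path])
    else
      match PySem.List.pyGet? path (-1) with
      | none => runB graf rest hasil      -- dead branch: every stack entry is a nonempty path
      | some last =>
        match hg : (PySem.Dict.mk graf).get? last with
        | none => runB graf rest hasil
        | some ns =>
          match f with
          | 0 => runB graf rest hasil     -- fuel guard, unreachable at the chosen fuel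
          | f'+1 =>
            runB graf
              (ns.reverse.foldl (fun st node =>
                if pvGuard path node then (f', path ++ [node]) :: st else st) rest)
              hasil
  termination_by st _ => (st.map fun e => (pvDeg graf + 2) ^ e.1).sum
  decreasing_by
  · simp
  · simp
  · simp
  · simp only [dite_eq_ite]
    rw [pvPush_eq]
    simp only [List.map_append, List.sum_append, List.map_map, List.map_cons, List.sum_cons]
    have hlen : ((ns.filter (pvGuard path)).length) ≤ pvDeg graf := by
      have h1 : (ns.filter (pvGuard path)).length ≤ ns.length := List.length_filter_le _ _
      have h2 := pvDeg_of_get? graf last ns hg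
      omega
    have hsum : (((ns.filter (pvGuard path)).map (fun node => (f', path ++ [node]))).map
        (fun e => (pvDeg graf + 2) ^ e.1)).sum = (ns.filter (pvGuard path)).length * (pvDeg graf + 2) ^ f' := by
      simp [List.map_map, Function.comp_def, List.map_const']
    have hpow : (ns.filter (pvGuard path)).length * (pvDeg graf + 2) ^ f' < (pvDeg graf + 2) ^ (f' + 1) := by
      rw [pow_succ]
      have hp : 0 < (pvDeg graf + 2) ^ f' := pow_pos (by omega : 0 < pvDeg graf + 2) f'
      calc (ns.filter (pvGuard path)).length * (pvDeg graf + 2) ^ f'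
          ≤ pvDeg graf * (pvDeg graf + 2) ^ f' := Nat.mul_le_mul_right _ hlen
        _ < (pvDeg graf + 2) ^ f' * (pvDeg graf + 2) := by
            rw [mul_comm]
            exact Nat.mul_lt_mul_of_le_of_lt (Nat.le_refl _) (by omega) hp
    simp [List.map_map] at hsum ⊢
    omega

def cari_semua_siklus_alt (graf : List (Int × List Int)) (awal : Int) (jalur : List Int) : List (List Int) :=
  runB graf [((graf.map fun p => p.2.length).sum + 1, jalur ++ [awal])] []

-- ===== PRECONDITION & SPEC =====
def Spec_cari_semua_siklus (graf : List (Int × List Int)) (awal : Int) (jalur : List Int) (out : List (List Int)) : Prop := out = cari_semua_siklus_alt graf awal jalur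
instance (graf : List (Int × List Int)) (awal : Int) (jalur : List Int) (out : List (List Int)) : Decidable (Spec_cari_semua_siklus graf awal jalur out) := by unfold Spec_cari_semua_siklus; infer_instance

-- ===== CLAIM (what is proved, stated in full; the proofs are below) =====
def Claim_equal_cari_semua_siklus : Prop := ∀ (graf : List (Int × List Int)) (awal : Int) (jalur : List Int), Dom_cari_semua_siklus graf awal jalur → Spec_cari_semua_siklus graf awal jalur (cari_semua_siklus graf awal jalur)

-- ===== LEMMAS AND PROOFS =====

lemma foldl_append_if_flatMap (l : List Int) (p : Int → Bool) (g : Int → List (List Int))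
    (acc : List (List Int)) :
    l.foldl (fun acc x => if p x then acc ++ g x else acc) acc
      = acc ++ (l.filter p).flatMap g := by
  induction l generalizing acc with
  | nil => simp
  | cons x l ih =>
      by_cases h : p x <;> simp [h, ih]

lemma cariF_zero_foldl (graf : List (Int × List Int)) (j : List Int) (ns : List Int) :
    ns.foldl (fun acc node => if pvGuard j node then acc ++ cariF 0 graf node j else acc) [] = [] := by
  have : ∀ acc : List (List Int),
      ns.foldl (fun acc node => if pvGuard j node then acc ++ cariF 0 graf node j else acc) acc = acc := by
    intro acc
    simp only [cariF, List.append_nil, ite_self]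
    exact List.foldl_fixed ns
  exact this []

-- The key invariant: popping one stack entry (with fuel f and path jl ++ [a]) produces exactly
-- what A's recursion at fuel f+1 produces from (a, jl), appended to the results, before the rest.
lemma runB_cons (graf : List (Int × List Int)) (f : Nat) :
    ∀ (jl : List Int) (a : Int) (rest : List (Nat × List Int)) (hasil : List (List Int)),
      runB graf ((f, jl ++ [a]) :: rest) hasil
        = runB graf rest (hasil ++ cariF (f + 1) graf a jl) := by
  induction f with
  | zero =>
      intro jl a rest hasil
      rw [runB, cariF]
      by_cases hc : pvClosing (jl ++ [a])
      · simp [hc]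
      · simp only [hc, if_neg, Bool.not_eq_true,
          PySem.List.pyGet?_neg_one_append_singleton]
        cases (PySem.Dict.mk graf).get? a with
        | none => simp
        | some ns => simp [cariF_zero_foldl]
  | succ f ih =>
      intro jl a rest hasil
      rw [runB, cariF]
      by_cases hc : pvClosing (jl ++ [a])
      · simp [hc]
      · simp only [hc, if_neg, Bool.not_eq_true,
          PySem.List.pyGet?_neg_one_append_singleton]
        cases (PySem.Dict.mk graf).get? a with
        | none => simp
        | some ns =>
            simp only []
            rw [pvPush_eq, foldl_append_if_flatMap]
            have aux : ∀ (L : List Int) (rest : List (Nat × List Int)) (hasil : List (List Int)),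
                runB graf (L.map (fun node => (f, (jl ++ [a]) ++ [node])) ++ rest) hasil
                  = runB graf rest (hasil ++ L.flatMap (fun node => cariF (f + 1) graf node (jl ++ [a]))) := by
              intro L
              induction L with
              | nil => intro rest hasil; simp
              | cons n L ihL =>
                  intro rest hasil
                  simp only [List.map_cons, List.cons_append, List.flatMap_cons]
                  rw [ih (jl ++ [a]) n, ihL, List.append_assoc]
            exact aux (ns.filter (pvGuard (jl ++ [a]))) rest hasil

-- ===== VERDICT (by name: the statement is the Claim_ definition above) =====
theorem cari_semua_siklus_spec : Claim_equal_cari_semua_siklus := by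
  intro graf awal jalur _
  unfold Spec_cari_semua_siklus cari_semua_siklus cari_semua_siklus_alt
  rw [runB_cons, runB]
  simp
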